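-- pv_equiv track=rewrite | github.com/MathijsMul/aoc_2021 | solutions/day_17.py | simulate_path
-- ===== SOURCE A (Python) =====
-- def simulate_path(speed, target_area):
--     speed_x, speed_y = speed
--     (target_x0, target_x1), (target_y0, target_y1) = target_area
--
--     path = [[0, 0]]
--     while path[-1][0] <= target_x1 and path[-1][1] >= target_y0:
--         pos = [path[-1][0] + speed_x, path[-1][1] + speed_y]
--
--         if speed_x > 0:
--             speed_x -= 1
--         elif speed_x < 0:
--             speed_x += 1
--
--         speed_y -= 1
--         path.append(pos)
--
--     return path
-- ===== SOURCE B (Python) =====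
-- def simulate_path(speed, target_area):
--     # Step-counter formulation: each point computed from closed-form triangular
--     # sums of the decaying velocities instead of updating velocities in a loop.
--     sx, sy = speed
--     (_x0, x1), (y0, _y1) = target_area
--     sgn = (sx > 0) - (sx < 0)
--     a = sgn * sx
--     freeze = sgn * (a * (a + 1) // 2)
--     path = []
--     t = 0
--     while True:
--         tri = t * (t - 1) // 2
--         x = t * sx - sgn * tri if t <= a else freeze
--         y = t * sy - tri
--         path.append([x, y])
--         if not (x <= x1 and y >= y0):
--             return path
--         t += 1
-- ===== Notes on version B (the rewrite author's own statement) =====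
-- stated objective: alternative
-- what changed: B replaces A's step-by-step velocity updates (drag on vx, gravity on vy) by a step counter t with closed-form triangular-sum positions: y(t)=t*sy-t*(t-1)//2, and x(t) from the same formula while t<=|sx|, frozen at sign(sx)*|sx|*(|sx|+1)//2 afterwards.
import Mathlib
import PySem

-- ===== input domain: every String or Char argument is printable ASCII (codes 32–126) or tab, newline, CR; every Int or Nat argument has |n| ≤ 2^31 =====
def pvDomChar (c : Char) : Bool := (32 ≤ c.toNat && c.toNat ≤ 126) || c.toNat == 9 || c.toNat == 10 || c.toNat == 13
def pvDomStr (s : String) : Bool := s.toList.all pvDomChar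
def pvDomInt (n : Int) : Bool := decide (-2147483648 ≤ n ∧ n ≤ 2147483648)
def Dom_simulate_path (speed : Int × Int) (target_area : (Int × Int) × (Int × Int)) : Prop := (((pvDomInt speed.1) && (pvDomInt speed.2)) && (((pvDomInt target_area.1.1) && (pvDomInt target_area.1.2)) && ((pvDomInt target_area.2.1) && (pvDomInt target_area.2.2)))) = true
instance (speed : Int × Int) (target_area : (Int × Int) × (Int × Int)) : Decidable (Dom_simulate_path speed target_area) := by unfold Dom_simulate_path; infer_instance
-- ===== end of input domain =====

-- B replaces the velocity-updating simulation by a step counter with closed-form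
-- triangular-sum positions (objective: alternative decomposition, same cost).

-- ===== PORT A =====
-- A's while loop: emit the current point; if it is still in bounds, step the
-- position by the velocities, apply drag to vx, gravity to vy, and continue.
def simALoop (x1 y0 : Int) (x y vx vy : Int) : List (List Int) :=
  if x ≤ x1 ∧ y ≥ y0 then
    [x, y] :: simALoop x1 y0 (x + vx) (y + vy)
      (if vx > 0 then vx - 1 else if vx < 0 then vx + 1 else vx) (vy - 1)
  else [[x, y]]
termination_by ((vy + 1).toNat, (y - y0 + 1).toNat)
decreasing_by
  by_cases h : 0 ≤ vy
  · exact Prod.Lex.left _ _ (by omega)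
  · have e : (vy - 1 + 1).toNat = (vy + 1).toNat := by omega
    rw [e]
    exact Prod.Lex.right _ (by omega)

def simulate_path (speed : Int × Int) (target_area : (Int × Int) × (Int × Int)) : List (List Int) :=
  simALoop target_area.1.2 target_area.2.1 0 0 speed.1 speed.2

-- ===== PORT B =====
-- tri t = t*(t-1) // 2 (Python floor division, exact here since t*(t-1) is even)
def triB (t : Int) : Int := PySem.Int.floordiv (t * (t - 1)) 2

-- needed by simBLoop's termination proof
theorem triB_succ (t : Int) : triB (t + 1) = triB t + t := by
  unfold triB
  rw [PySem.Int.floordiv_eq_ediv_of_pos (by omega), PySem.Int.floordiv_eq_ediv_of_pos (by omega)]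
  have h : (t + 1) * (t + 1 - 1) = t * (t - 1) + 2 * t := by ring
  rw [h]
  generalize t * (t - 1) = n
  omega

def pointB (sx sy sgn a freeze t : Int) : Int × Int :=
  let tri := triB t
  (if t ≤ a then t * sx - sgn * tri else freeze, t * sy - tri)

def simBLoop (x1 y0 sx sy sgn a freeze : Int) (t : Int) : List (List Int) :=
  let p := pointB sx sy sgn a freeze t
  if p.1 ≤ x1 ∧ p.2 ≥ y0 then
    [p.1, p.2] :: simBLoop x1 y0 sx sy sgn a freeze (t + 1)
  else [[p.1, p.2]]
termination_by ((sy - t + 1).toNat, ((t * sy - triB t) - y0 + 1).toNat)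
decreasing_by
  have hy : (t + 1) * sy - triB (t + 1) = (t * sy - triB t) + (sy - t) := by
    rw [triB_succ]; ring
  by_cases h : t ≤ sy
  · exact Prod.Lex.left _ _ (by omega)
  · have hp2 : p.2 = t * sy - triB t := rfl
    have e : (sy - (t + 1) + 1).toNat = (sy - t + 1).toNat := by omega
    rw [e]
    exact Prod.Lex.right _ (by omega)

def simulate_path_alt (speed : Int × Int) (target_area : (Int × Int) × (Int × Int)) : List (List Int) :=
  let sx := speed.1
  let sy := speed.2
  let sgn : Int := (if sx > 0 then 1 else 0) - (if sx < 0 then 1 else 0)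
  let a := sgn * sx
  let freeze := sgn * PySem.Int.floordiv (a * (a + 1)) 2
  simBLoop target_area.1.2 target_area.2.1 sx sy sgn a freeze 0

-- ===== PRECONDITION & SPEC =====
def Spec_simulate_path (speed : Int × Int) (target_area : (Int × Int) × (Int × Int)) (out : List (List Int)) : Prop := out = simulate_path_alt speed target_area
instance (speed : Int × Int) (target_area : (Int × Int) × (Int × Int)) (out : List (List Int)) : Decidable (Spec_simulate_path speed target_area out) := by unfold Spec_simulate_path; infer_instance

-- ===== CLAIM (what is proved, stated in full; the proofs are below) =====
def Claim_equal_simulate_path : Prop := ∀ (speed : Int × Int) (target_area : (Int × Int) × (Int × Int)), Dom_simulate_path speed target_area → Spec_simulate_path speed target_area (simulate_path speed target_area)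

-- ===== LEMMAS AND PROOFS =====

-- velocity of A after t ≥ 0 drag steps
def vxA (sx t : Int) : Int :=
  if sx > 0 then max (sx - t) 0 else if sx < 0 then min (sx + t) 0 else 0

theorem two_triB (t : Int) : 2 * triB t = t * (t - 1) := by
  unfold triB
  rw [PySem.Int.floordiv_eq_ediv_of_pos (by omega)]
  have h : Even (t * (t - 1)) := Int.even_mul_pred_self t
  obtain ⟨k, hk⟩ := h
  omega

theorem main_lemma (x1 y0 sx sy : Int)
    (sgn a freeze : Int)
    (hsgn : sgn = (if sx > 0 then 1 else 0) - (if sx < 0 then 1 else 0))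
    (ha : a = sgn * sx)
    (hf : freeze = sgn * PySem.Int.floordiv (a * (a + 1)) 2) :
    ∀ t : Int,
      simALoop x1 y0 (pointB sx sy sgn a freeze t).1 (pointB sx sy sgn a freeze t).2
        (vxA sx t) (sy - t)
      = simBLoop x1 y0 sx sy sgn a freeze t := by
  have h2f : 2 * freeze = sgn * (a * (a + 1)) := by
    have h : Even (a * (a + 1)) := Int.even_mul_succ_self a
    obtain ⟨k, hk⟩ := h
    have hq : 2 * PySem.Int.floordiv (a * (a + 1)) 2 = a * (a + 1) := by
      rw [PySem.Int.floordiv_eq_ediv_of_pos (by omega)]; omega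
    rw [hf]; linear_combination sgn * hq
  intro t
  fun_induction simBLoop x1 y0 sx sy sgn a freeze t with
  | case1 t p hc ih =>
    have hp : p = pointB sx sy sgn a freeze t := rfl
    rw [hp] at hc
    have hx : (pointB sx sy sgn a freeze t).1 + vxA sx t = (pointB sx sy sgn a freeze (t+1)).1 := by
      have h2t := two_triB t
      have h2t1 := two_triB (t + 1)
      simp only [pointB, vxA]
      rcases lt_trichotomy sx 0 with hs | hs | hs
      · have hsg : sgn = -1 := by rw [hsgn, if_neg (by omega), if_pos hs]; norm_num
        have haa : a = -sx := by rw [ha, hsg]; ring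
        have e1 : 2 * freeze = -(a * (a + 1)) := by rw [hsg] at h2f; linarith
        rw [if_neg (by omega : ¬ sx > 0), if_pos hs]
        by_cases h1 : t + 1 ≤ a
        · rw [if_pos (by omega), if_pos h1]
          have hm : min (sx + t) 0 = sx + t := by omega
          rw [hm, hsg]
          nlinarith [h2t, h2t1]
        · by_cases h0 : t ≤ a
          · have hta : t = a := by omega
            rw [if_pos h0, if_neg h1]
            have hm : min (sx + t) 0 = sx + t := by omega
            rw [hm, hsg]
            subst hta
            subst haa
            ring_nf at h2t e1 ⊢
            omega
          · rw [if_neg h0, if_neg h1]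
            have hm : min (sx + t) 0 = 0 := by omega
            rw [hm]; ring
      · have hsg : sgn = 0 := by rw [hsgn]; simp [hs]
        have hfz : freeze = 0 := by
          rw [hsg] at h2f; simp at h2f; omega
        rw [if_neg (by omega : ¬ sx > 0), if_neg (by omega : ¬ sx < 0)]
        rw [hs, hsg, hfz]
        split_ifs <;> ring
      · have hsg : sgn = 1 := by rw [hsgn, if_pos hs, if_neg (by omega)]; norm_num
        have haa : a = sx := by rw [ha, hsg]; ring
        have e1 : 2 * freeze = a * (a + 1) := by rw [hsg] at h2f; linarith
        rw [if_pos hs]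
        by_cases h1 : t + 1 ≤ a
        · rw [if_pos (by omega), if_pos h1]
          have hm : max (sx - t) 0 = sx - t := by omega
          rw [hm, hsg]
          nlinarith [h2t, h2t1]
        · by_cases h0 : t ≤ a
          · have hta : t = a := by omega
            rw [if_pos h0, if_neg h1]
            have hm : max (sx - t) 0 = sx - t := by omega
            rw [hm, hsg]
            subst hta
            subst haa
            ring_nf at h2t e1 ⊢
            omega
          · rw [if_neg h0, if_neg h1]
            have hm : max (sx - t) 0 = 0 := by omega
            rw [hm]; ring
    have hy : (pointB sx sy sgn a freeze t).2 + (sy - t) = (pointB sx sy sgn a freeze (t+1)).2 := by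
      simp only [pointB]; rw [triB_succ]; ring
    have hvx : (if vxA sx t > 0 then vxA sx t - 1 else if vxA sx t < 0 then vxA sx t + 1 else vxA sx t) = vxA sx (t + 1) := by
      simp only [vxA]; split_ifs <;> omega
    have hvy : sy - t - 1 = sy - (t + 1) := by ring
    rw [simALoop, if_pos hc, hx, hy, hvx, hvy, ih]
  | case2 t p hc =>
    have hp : p = pointB sx sy sgn a freeze t := rfl
    rw [hp] at hc
    rw [simALoop, if_neg hc]

theorem pointB_zero (sx sy sgn a freeze : Int) (ha : 0 ≤ a) :
    pointB sx sy sgn a freeze 0 = (0, 0) := by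
  simp [pointB, triB, PySem.Int.floordiv_eq_ediv_of_pos, ha]

-- ===== VERDICT (by name: the statement is the Claim_ definition above) =====
theorem simulate_path_spec : Claim_equal_simulate_path := by
  intro speed ta _
  unfold Spec_simulate_path simulate_path simulate_path_alt
  obtain ⟨sx, sy⟩ := speed
  show simALoop _ _ _ _ _ _ = simBLoop _ _ sx sy
      ((if sx > 0 then (1:Int) else 0) - (if sx < 0 then 1 else 0))
      (((if sx > 0 then (1:Int) else 0) - (if sx < 0 then 1 else 0)) * sx)
      ((((if sx > 0 then (1:Int) else 0) - (if sx < 0 then 1 else 0))) *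
        PySem.Int.floordiv ((((if sx > 0 then (1:Int) else 0) - (if sx < 0 then 1 else 0)) * sx) *
          ((((if sx > 0 then (1:Int) else 0) - (if sx < 0 then 1 else 0)) * sx) + 1)) 2) 0
  have ha0 : 0 ≤ ((if sx > 0 then (1:Int) else 0) - (if sx < 0 then 1 else 0)) * sx := by
    split_ifs <;> ring_nf <;> omega
  have h := main_lemma ta.1.2 ta.2.1 sx sy _ _ _ rfl rfl rfl 0
  rw [pointB_zero _ _ _ _ _ ha0] at h
  have hv0 : vxA sx 0 = sx := by unfold vxA; split_ifs <;> omega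
  rw [hv0] at h
  simpa using h
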